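-- pv_equiv track=rewrite | github.com/snowlesswinter/db_debug_stat | generate_data_for_db_importing.py | match_db_lost_pattern
-- ===== SOURCE A (Python) =====
-- def match_db_lost_pattern(log_file_lines, process_open_db, db_lost_desc):
--     match = False
--     if len(log_file_lines) == len(process_open_db) + len(db_lost_desc):
--         match = True
--         if log_file_lines[0].find(process_open_db[0]) == -1 or \
--            log_file_lines[-1].find(process_open_db[1]) == -1:
--             match = False
--
--         if match:
--             for index, line in enumerate(log_file_lines[1:-1]):
--                 if line.find(db_lost_desc[index]) == -1:
--                     match = False
--                     break
--
--     return match
-- ===== SOURCE B (Python) =====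
-- def match_db_lost_pattern(log_file_lines, process_open_db, db_lost_desc):
--     if len(log_file_lines) != len(process_open_db) + len(db_lost_desc):
--         return False
--
--     def consume(lines, descs):
--         if not descs:
--             return lines[0].find(process_open_db[1]) != -1
--         return lines[0].find(descs[0]) != -1 and consume(lines[1:], descs[1:])
--
--     return log_file_lines[0].find(process_open_db[0]) != -1 and \
--         consume(log_file_lines[1:], db_lost_desc)
-- ===== Notes on version B (the rewrite author's own statement) =====
-- stated objective: alternative
-- what changed: B replaces A's staged head/tail edge checks plus an indexed middle loop with break by a recursive consumer that peels one line and one lost-descriptor per step and checks the close pattern at the base case, so no enumerate index, no tail pre-check and no negative indexing are needed.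
-- outside the precondition, e.g. on match_db_lost_pattern(['a', 'b', 'c'], ['a', 'b', 'c'], []): A returns False, B returns True; on match_db_lost_pattern(['a', 'x', 'b'], ['a', 'q', 'b'], []): A returns False, B returns False
import Mathlib
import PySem

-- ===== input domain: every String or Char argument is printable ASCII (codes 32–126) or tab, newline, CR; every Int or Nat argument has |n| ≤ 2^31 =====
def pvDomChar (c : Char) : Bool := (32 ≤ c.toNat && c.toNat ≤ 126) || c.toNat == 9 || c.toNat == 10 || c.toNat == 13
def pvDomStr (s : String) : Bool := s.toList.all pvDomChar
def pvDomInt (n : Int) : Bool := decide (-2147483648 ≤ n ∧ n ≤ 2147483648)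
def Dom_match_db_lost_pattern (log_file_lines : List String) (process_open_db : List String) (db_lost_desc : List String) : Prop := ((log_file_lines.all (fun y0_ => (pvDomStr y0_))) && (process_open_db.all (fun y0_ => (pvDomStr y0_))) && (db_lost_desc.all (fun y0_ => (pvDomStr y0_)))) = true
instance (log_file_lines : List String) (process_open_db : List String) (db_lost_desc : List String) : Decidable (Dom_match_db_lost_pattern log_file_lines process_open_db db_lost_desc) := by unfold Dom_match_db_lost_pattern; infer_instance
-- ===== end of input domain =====

-- B replaces A's staged head/tail checks and indexed middle loop (with break) by a recursive
-- consumer peeling one line and one descriptor per step, checking the close pattern at the base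
-- case (objective: alternative decomposition, same cost).


-- ===== PORT A =====
-- the 'for index, line in enumerate(log_file_lines[1:-1]): … break' loop, carrying the index;
-- 'none' from pyGet? is Python's IndexError on db_lost_desc[index] (outside Pre_)
def pvALoop (db_lost_desc : List String) (index : Int) : List String → Bool
  | [] => true
  | line :: rest =>
      match PySem.List.pyGet? db_lost_desc index with
      | none => false
      | some d => if PySem.Str.find line d = -1 then false else pvALoop db_lost_desc (index + 1) rest

def match_db_lost_pattern (log_file_lines : List String) (process_open_db : List String) (db_lost_desc : List String) : Bool :=
  if log_file_lines.length = process_open_db.length + db_lost_desc.length then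
    -- log_file_lines[0], log_file_lines[-1], process_open_db[0], process_open_db[1];
    -- 'none' is Python's IndexError (outside Pre_)
    match PySem.List.pyGet? log_file_lines 0, PySem.List.pyGet? log_file_lines (-1),
          PySem.List.pyGet? process_open_db 0, PySem.List.pyGet? process_open_db 1 with
    | some l0, some ln, some p0, some p1 =>
        if PySem.Str.find l0 p0 = -1 ∨ PySem.Str.find ln p1 = -1 then false
        else pvALoop db_lost_desc 0 (PySem.List.slice log_file_lines (some 1) (some (-1)))
    | _, _, _, _ => false
  else false

-- ===== PORT B =====
-- Source B's inner 'consume(lines, descs)': peel one line against one descriptor per step;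
-- at the base case check the close pattern process_open_db[1] against the current head.
-- 'none' from pyGet? is Python's IndexError (outside Pre_)
def pvConsume (process_open_db : List String) : List String → List String → Bool
  | lines, [] =>
      match PySem.List.pyGet? lines 0, PySem.List.pyGet? process_open_db 1 with
      | some l, some closer => PySem.Str.find l closer ≠ -1
      | some _, none => false
      | none, some _ => false
      | none, none => false
  | lines, d :: descs =>
      match PySem.List.pyGet? lines 0 with
      | some l =>
          PySem.Str.find l d ≠ -1 &&
          pvConsume process_open_db (PySem.List.slice lines (some 1) none) descs
      | none => false

def match_db_lost_pattern_alt (log_file_lines : List String) (process_open_db : List String) (db_lost_desc : List String) : Bool :=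
  if log_file_lines.length ≠ process_open_db.length + db_lost_desc.length then false
  else
    match PySem.List.pyGet? log_file_lines 0, PySem.List.pyGet? process_open_db 0 with
    | some l0, some p0 =>
        PySem.Str.find l0 p0 ≠ -1 &&
        pvConsume process_open_db (PySem.List.slice log_file_lines (some 1) none) db_lost_desc
    | some _, none => false
    | none, some _ => false
    | none, none => false

-- ===== PRECONDITION & SPEC =====
-- Pre_ excludes inputs where the length guard holds but process_open_db does not have exactly two
-- entries: there A either raises IndexError (on process_open_db[0]/[1] or db_lost_desc[index]) or,
-- when an early find fails, returns an accidental False from comparing against the wrong entries.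
def Pre_match_db_lost_pattern (log_file_lines : List String) (process_open_db : List String) (db_lost_desc : List String) : Prop :=
  log_file_lines.length = process_open_db.length + db_lost_desc.length → process_open_db.length = 2
instance (log_file_lines : List String) (process_open_db : List String) (db_lost_desc : List String) : Decidable (Pre_match_db_lost_pattern log_file_lines process_open_db db_lost_desc) := by unfold Pre_match_db_lost_pattern; infer_instance
def pvWitness_match_db_lost_pattern : List String × List String × List String :=
  (["open db", "page lost", "close db"], ["open", "close"], ["lost"])
def Spec_match_db_lost_pattern (log_file_lines : List String) (process_open_db : List String) (db_lost_desc : List String) (out : Bool) : Prop := out = match_db_lost_pattern_alt log_file_lines process_open_db db_lost_desc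
instance (log_file_lines : List String) (process_open_db : List String) (db_lost_desc : List String) (out : Bool) : Decidable (Spec_match_db_lost_pattern log_file_lines process_open_db db_lost_desc out) := by unfold Spec_match_db_lost_pattern; infer_instance

-- ===== CLAIM (what is proved, stated in full; the proofs are below) =====
def Claim_equal_match_db_lost_pattern : Prop := ∀ (log_file_lines : List String) (process_open_db : List String) (db_lost_desc : List String), Dom_match_db_lost_pattern log_file_lines process_open_db db_lost_desc → Pre_match_db_lost_pattern log_file_lines process_open_db db_lost_desc → Spec_match_db_lost_pattern log_file_lines process_open_db db_lost_desc (match_db_lost_pattern log_file_lines process_open_db db_lost_desc)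

-- ===== LEMMAS AND PROOFS =====

-- A's middle loop over mid, indexing pre ++ desc from index pre.length, as a zip-all of mid
-- against desc, provided the lengths agree.
theorem pvALoop_eq_zip_all (mid : List String) : ∀ (pre desc : List String),
    mid.length = desc.length →
    pvALoop (pre ++ desc) pre.length mid
      = (mid.zip desc).all (fun lp => PySem.Str.find lp.1 lp.2 ≠ -1) := by
  induction mid with
  | nil => intro pre desc h; simp [pvALoop]
  | cons line rest ih =>
    intro pre desc h
    cases desc with
    | nil => simp at h
    | cons d ds =>
      have hget : PySem.List.pyGet? (pre ++ d :: ds) (pre.length : Int) = some d :=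
        PySem.List.pyGet?_append_length ..
      have hrec : pvALoop (pre ++ d :: ds) ((pre.length : Int) + 1) rest
          = (rest.zip ds).all (fun lp => PySem.Str.find lp.1 lp.2 ≠ -1) := by
        have := ih (pre ++ [d]) ds (by simpa using h)
        simpa [List.append_assoc, add_comm] using this
      simp only [pvALoop, hget, List.zip_cons_cons, List.all_cons]
      by_cases hf : PySem.Str.find line d = -1 <;> simp [hrec]

-- B's recursive consumer, on mid ++ [ln] against desc of equal middle length, is the same
-- zip-all of mid against desc conjoined with the close-pattern check on ln.
theorem pvConsume_eq (p0 p1 : String) : ∀ (desc mid : List String) (ln : String),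
    mid.length = desc.length →
    pvConsume [p0, p1] (mid ++ [ln]) desc
      = ((mid.zip desc).all (fun lp => PySem.Str.find lp.1 lp.2 ≠ -1)
          && PySem.Str.find ln p1 ≠ -1) := by
  intro desc
  induction desc with
  | nil =>
    intro mid ln h
    have : mid = [] := List.eq_nil_of_length_eq_zero h
    subst this
    simp [pvConsume, PySem.List.pyGet?_zero_cons]
  | cons d ds ih =>
    intro mid ln h
    cases mid with
    | nil => simp at h
    | cons l ls =>
      have hget : PySem.List.pyGet? ((l :: ls) ++ [ln]) 0 = some l :=
        PySem.List.pyGet?_zero_cons ..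
      have hslice : PySem.List.slice ((l :: ls) ++ [ln]) (some 1) none = ls ++ [ln] := by
        simpa using PySem.List.slice_from_one ((l :: ls) ++ [ln])
      simp only [pvConsume, hget, hslice, ih ls ln (by simpa using h),
        List.zip_cons_cons, List.all_cons]
      by_cases hf : PySem.Str.find l d = -1 <;> simp [hf, Bool.and_assoc]

theorem match_db_lost_pattern_eq (log_file_lines process_open_db db_lost_desc : List String)
    (hpre : Pre_match_db_lost_pattern log_file_lines process_open_db db_lost_desc) :
    match_db_lost_pattern log_file_lines process_open_db db_lost_desc
      = match_db_lost_pattern_alt log_file_lines process_open_db db_lost_desc := by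
  unfold match_db_lost_pattern match_db_lost_pattern_alt
  by_cases hlen : log_file_lines.length = process_open_db.length + db_lost_desc.length
  · have hp2 : process_open_db.length = 2 := hpre hlen
    obtain ⟨p0, p1, hpod⟩ : ∃ p0 p1, process_open_db = [p0, p1] := by
      match process_open_db, hp2 with
      | [p0, p1], _ => exact ⟨p0, p1, rfl⟩
    subst hpod
    have hlines : ∃ l0 mid ln, log_file_lines = l0 :: (mid ++ [ln]) ∧
        mid.length = db_lost_desc.length := by
      match log_file_lines, hlen with
      | [], hlen => simp at hlen; omega
      | l0 :: rest, hlen =>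
        have hr : rest ≠ [] := by
          intro h; subst h; simp at hlen; omega
        refine ⟨l0, rest.dropLast, rest.getLast hr, by simp [List.dropLast_concat_getLast hr], ?_⟩
        have h2 : rest.dropLast.length = rest.length - 1 := List.length_dropLast
        simp at hlen; omega
    obtain ⟨l0, mid, ln, hL, hml⟩ := hlines
    subst hL
    have hget0 : PySem.List.pyGet? (l0 :: (mid ++ [ln])) 0 = some l0 :=
      PySem.List.pyGet?_zero_cons ..
    have hgetn : PySem.List.pyGet? (l0 :: (mid ++ [ln])) (-1) = some ln := by
      have : l0 :: (mid ++ [ln]) = (l0 :: mid) ++ [ln] := by simp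
      rw [this]; exact PySem.List.pyGet?_neg_one_append_singleton ..
    have hsliceA : PySem.List.slice (l0 :: (mid ++ [ln])) (some 1) (some (-1)) = mid := by
      simp [PySem.List.slice, PySem.List.clampIdx]
      rw [if_neg (by omega)]
      simp
    have hsliceB : PySem.List.slice (l0 :: (mid ++ [ln])) (some 1) none = mid ++ [ln] := by
      simpa using PySem.List.slice_from_one (l0 :: (mid ++ [ln]))
    have hBlen : ¬ (l0 :: (mid ++ [ln])).length ≠ [p0, p1].length + db_lost_desc.length := by
      simpa using hlen
    simp only [if_pos hlen, if_neg hBlen, hget0, hgetn,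
      show PySem.List.pyGet? [p0, p1] 0 = some p0 from rfl,
      show PySem.List.pyGet? [p0, p1] 1 = some p1 from rfl]
    have hloop : pvALoop db_lost_desc 0 mid
        = (mid.zip db_lost_desc).all (fun lp => PySem.Str.find lp.1 lp.2 ≠ -1) := by
      simpa using pvALoop_eq_zip_all mid [] db_lost_desc hml
    rw [hsliceA, hsliceB, hloop, pvConsume_eq p0 p1 db_lost_desc mid ln hml]
    by_cases h0 : PySem.Str.find l0 p0 = -1 <;>
      by_cases hn : PySem.Str.find ln p1 = -1 <;>
        simp [h0, hn, Bool.and_comm, Bool.and_assoc, Bool.and_left_comm]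
  · simp [hlen]

-- ===== VERDICT (by name: the statement is the Claim_ definition above) =====
theorem match_db_lost_pattern_spec : Claim_equal_match_db_lost_pattern := by
  intro log_file_lines process_open_db db_lost_desc _ hpre
  unfold Spec_match_db_lost_pattern
  exact match_db_lost_pattern_eq _ _ _ hpre
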